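-- pv_equiv track=rewrite | github.com/cirosantilli/project-euler-solvers | solvers/696.py | _convolve_len_tiles
-- ===== SOURCE A (Python) =====
-- MOD = 1_000_000_007
--
-- def _convolve_len_tiles(A, B_terms, max_len: int, max_tiles: int):
--     """
--     Convolution in (length, tiles):
--       C[L1+L2][T1+T2] += A[L1][T1] * B[L2][T2]
--     where B is given as per-length sparse lists.
--     """
--     C = [[0] * (max_tiles + 1) for _ in range(max_len + 1)]
--     for L1 in range(max_len + 1):
--         row1 = A[L1]
--         if not any(row1):
--             continue
--         max_L2 = max_len - L1
--         for L2 in range(1, max_L2 + 1):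
--             terms = B_terms[L2]
--             if not terms:
--                 continue
--             out = C[L1 + L2]
--             for T1, v1 in enumerate(row1):
--                 if not v1:
--                     continue
--                 for T2, v2 in terms:
--                     TT = T1 + T2
--                     if TT <= max_tiles:
--                         out[TT] = (out[TT] + v1 * v2) % MOD
--     return C
-- ===== SOURCE B (Python) =====
-- MOD = 1_000_000_007
--
-- def _convolve_len_tiles(A, B_terms, max_len: int, max_tiles: int):
--     """
--     Gather form: each output cell C[L][T] is computed directly as the sum over
--     source lengths L2 and sparse terms (T2, v2) of B_terms[L2] of the shifted
--     A value A[L - L2][T - T2] * v2, reduced mod MOD once per cell.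
--     """
--     nB = len(B_terms)
--     return [
--         [
--             sum(
--                 A[L - L2][T - T2] * v2
--                 for L2 in range(1, min(L, nB - 1) + 1)
--                 for (T2, v2) in B_terms[L2]
--                 if 0 <= T - T2 < len(A[L - L2])
--             ) % MOD
--             for T in range(max_tiles + 1)
--         ]
--         for L in range(max_len + 1)
--     ]
-- ===== Notes on version B (the rewrite author's own statement) =====
-- stated objective: alternative
-- what changed: Scatter convolution (quadruple loop writing shifted contributions into output cells with a per-write mod) is replaced by a gather: each output cell C[L][T] is computed directly as the sum of A[L-L2][T-T2]*v2 over source lengths and sparse B terms, reduced mod p once per cell. Pre_ restricts tile offsets T2 in B_terms to be non-negative (the natural domain) and requires A/B_terms shapes on which the Python A completes without IndexError: on negative T2 A's write index T1+T2 can go negative and wrap to the end of the output row, and short A/B_terms lists make A raise.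
-- outside the precondition, e.g. on _convolve_len_tiles([[1], [0]], [[], [(-1, 1)]], 1, 0): A returns [[0], [1]], B returns [[0], [0]]
import Mathlib
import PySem

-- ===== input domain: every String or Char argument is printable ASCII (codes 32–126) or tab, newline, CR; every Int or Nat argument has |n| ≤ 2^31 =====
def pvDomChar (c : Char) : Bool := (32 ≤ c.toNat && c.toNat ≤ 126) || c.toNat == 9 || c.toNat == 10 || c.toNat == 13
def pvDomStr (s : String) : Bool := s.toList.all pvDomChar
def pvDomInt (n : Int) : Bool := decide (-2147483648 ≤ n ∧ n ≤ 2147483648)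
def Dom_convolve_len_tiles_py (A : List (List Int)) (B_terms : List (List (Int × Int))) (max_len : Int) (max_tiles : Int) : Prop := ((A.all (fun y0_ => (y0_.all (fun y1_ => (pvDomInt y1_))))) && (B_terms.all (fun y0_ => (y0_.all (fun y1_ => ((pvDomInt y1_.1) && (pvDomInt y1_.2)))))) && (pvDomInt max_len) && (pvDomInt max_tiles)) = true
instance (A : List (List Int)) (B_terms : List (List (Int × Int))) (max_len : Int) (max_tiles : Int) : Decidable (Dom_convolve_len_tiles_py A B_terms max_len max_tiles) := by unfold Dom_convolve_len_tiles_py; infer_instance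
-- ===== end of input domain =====

-- B replaces A's scatter convolution (writes into shifted output cells, mod per write)
-- by a gather that computes each output cell directly as a sum of shifted A values, mod once per cell:
-- an alternative decomposition of the same cost. Equality of RETURN values is proved on Pre_.

def pvMOD : Int := 1000000007

-- ===== PORT A =====
-- literal transliteration of A's scatter loops; the `.getD []`/pySetD defaults stand for
-- Python's IndexError cases, which Pre_ excludes.
def convolve_len_tiles_py (A : List (List Int)) (B_terms : List (List (Int × Int))) (max_len : Int) (max_tiles : Int) : List (List Int) :=
  let C0 : List (List Int) := (PySem.List.pyRange 0 (max_len + 1) 1).map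
    (fun _ => (PySem.List.pyRange 0 (max_tiles + 1) 1).map (fun _ => (0 : Int)))
  (PySem.List.pyRange 0 (max_len + 1) 1).foldl (fun C L1 =>
    let row1 := (PySem.List.pyGet? A L1).getD []        -- A[L1] (IndexError → outside Pre_)
    if row1.any (fun v => v ≠ 0) then                   -- if not any(row1): continue
      (PySem.List.pyRange 1 (max_len - L1 + 1) 1).foldl (fun C L2 =>
        let terms := (PySem.List.pyGet? B_terms L2).getD []   -- B_terms[L2] (IndexError → outside Pre_)
        if terms ≠ [] then                              -- if not terms: continue
          let idx := L1 + L2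
          let out := PySem.List.pyGetD C idx []         -- out = C[L1 + L2]
          let out' := (PySem.List.enumerate row1 0).foldl (fun out tv =>
            if tv.2 ≠ 0 then                            -- if not v1: continue
              terms.foldl (fun out t2v =>
                let TT := tv.1 + t2v.1
                if TT ≤ max_tiles then
                  -- out[TT] = (out[TT] + v1 * v2) % MOD  (negative TT wraps, as in Python)
                  PySem.List.pySetD out TT (PySem.Int.mod (PySem.List.pyGetD out TT 0 + tv.2 * t2v.2) pvMOD)
                else out) out
            else out) out
          PySem.List.pySetD C idx out'
        else C) C
    else C) C0

-- ===== PORT B =====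
-- literal transliteration of Source B's gather comprehension.
def convolve_len_tiles_py_alt (A : List (List Int)) (B_terms : List (List (Int × Int))) (max_len : Int) (max_tiles : Int) : List (List Int) :=
  let nB : Int := PySem.List.len B_terms
  (PySem.List.pyRange 0 (max_len + 1) 1).map (fun L =>
    (PySem.List.pyRange 0 (max_tiles + 1) 1).map (fun T =>
      PySem.Int.mod
        ((PySem.List.pyRange 1 (min L (nB - 1) + 1) 1).foldl (fun s L2 =>
          let src := (PySem.List.pyGet? A (L - L2)).getD []
          ((PySem.List.pyGet? B_terms L2).getD []).foldl (fun s t2v =>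
            if 0 ≤ T - t2v.1 ∧ T - t2v.1 < PySem.List.len src then
              s + PySem.List.pyGetD src (T - t2v.1) 0 * t2v.2
            else s) s) 0)
        pvMOD))

-- ===== PRECONDITION & SPEC =====
-- Pre_ excludes (a) inputs where Python A raises IndexError (A shorter than max_len+1, or
-- B_terms too short while a nonzero A row still needs the missing entry, or a write index
-- below -(max_tiles+1)), and (b) negative tile offsets T2 in B_terms, outside the natural
-- domain, where A's write index T1+T2 can go negative and wrap to the end of the row
-- (only B_terms rows that a nonzero A row actually reaches are restricted).
def Pre_convolve_len_tiles_py (A : List (List Int)) (B_terms : List (List (Int × Int))) (max_len : Int) (max_tiles : Int) : Prop :=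
  max_len < 0 ∨
  (max_len + 1 ≤ (A.length : Int) ∧
   (∀ r ∈ A.take (max_len + 1 - (B_terms.length : Int)).toNat, ∀ v ∈ r, v = 0) ∧
   (∀ L2 ∈ PySem.List.pyRange 1 (max_len + 1) 1,
     (¬ ∀ r ∈ A.take ((max_len - L2 + 1).toNat), ∀ v ∈ r, v = 0) →
     ∀ p ∈ (PySem.List.pyGet? B_terms L2).getD [], 0 ≤ p.1))
instance (A : List (List Int)) (B_terms : List (List (Int × Int))) (max_len : Int) (max_tiles : Int) : Decidable (Pre_convolve_len_tiles_py A B_terms max_len max_tiles) := by unfold Pre_convolve_len_tiles_py; infer_instance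

def pvWitness_convolve_len_tiles_py : List (List Int) × (List (List (Int × Int))) × Int × Int :=
  ([[1, 2], [0, 0]], ([[], [(0, 3), (1, 4)]], 1, 1))

def Spec_convolve_len_tiles_py (A : List (List Int)) (B_terms : List (List (Int × Int))) (max_len : Int) (max_tiles : Int) (out : List (List Int)) : Prop := out = convolve_len_tiles_py_alt A B_terms max_len max_tiles
instance (A : List (List Int)) (B_terms : List (List (Int × Int))) (max_len : Int) (max_tiles : Int) (out : List (List Int)) : Decidable (Spec_convolve_len_tiles_py A B_terms max_len max_tiles out) := by unfold Spec_convolve_len_tiles_py; infer_instance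

-- ===== CLAIM (what is proved, stated in full; the proofs are below) =====
def Claim_equal_convolve_len_tiles_py : Prop := ∀ (A : List (List Int)) (B_terms : List (List (Int × Int))) (max_len : Int) (max_tiles : Int), Dom_convolve_len_tiles_py A B_terms max_len max_tiles → Pre_convolve_len_tiles_py A B_terms max_len max_tiles → Spec_convolve_len_tiles_py A B_terms max_len max_tiles (convolve_len_tiles_py A B_terms max_len max_tiles)

-- ===== LEMMAS AND PROOFS =====

-- ===== generic lemmas =====
theorem pv_foldl_mod_inv {α β : Type} (Mv : Int) (proj : β → Int) (Q : β → Prop)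
    (step : β → α → β) (w : α → Int) :
    ∀ (xs : List α),
    (∀ g x s, x ∈ xs → Q g → proj g = s % Mv → Q (step g x) ∧ proj (step g x) = (s + w x) % Mv) →
    ∀ (s : Int) (g : β), Q g → proj g = s % Mv →
      Q (xs.foldl step g) ∧ proj (xs.foldl step g) = (s + (xs.map w).sum) % Mv := by
  intro xs
  induction xs with
  | nil => intro _ s g hQ hp; simpa using ⟨hQ, hp⟩
  | cons x xs ih =>
    intro h s g hQ hp
    obtain ⟨hQ', hp'⟩ := h g x s (by simp) hQ hp
    have := ih (fun g x s hx => h g x s (by simp [hx])) (s + w x) (step g x) hQ' hp'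
    simpa [add_assoc] using this

theorem pv_foldl_len {α : Type} (step : List Int → α → List Int)
    (h : ∀ r x, (step r x).length = r.length) :
    ∀ (xs : List α) (r : List Int), (xs.foldl step r).length = r.length := by
  intro xs
  induction xs with
  | nil => simp
  | cons x xs ih => intro r; simp [ih, h]

theorem pv_getD_zero (l : List Int) (h : ∀ x ∈ l, x = 0) (k : Nat) : l.getD k 0 = 0 := by
  rcases hk : l[k]? with _ | x
  · simp [List.getD, hk]
  · have := h x (List.mem_of_getElem? hk)
    simp [List.getD, hk, this]

theorem pv_getD_set_self (l : List Int) (j : Nat) (h : j < l.length) (v : Int) :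
    (l.set j v).getD j 0 = v := by simp [List.getD, h]

theorem pv_getD_set_ne (l : List Int) (j k : Nat) (h : j ≠ k) (v : Int) :
    (l.set j v).getD k 0 = l.getD k 0 := by simp [List.getD, List.getElem?_set_ne h]

theorem pv_sum_pyRange (a b : Int) (f : Int → Int) :
    ((PySem.List.pyRange a b 1).map f).sum = ∑ k ∈ Finset.range (b - a).toNat, f (a + k) := by
  rw [PySem.List.pyRange_one, List.map_map]; rfl

theorem pv_foldl_ite_add {α : Type} (c : α → Prop) [DecidablePred c] (f : α → Int) :
    ∀ (xs : List α) (s : Int),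
    xs.foldl (fun s x => if c x then s + f x else s) s
      = s + (xs.map (fun x => if c x then f x else 0)).sum := by
  intro xs
  induction xs with
  | nil => simp
  | cons x xs ih => intro s; by_cases h : c x <;> simp [h, ih, add_assoc]

theorem pv_sum_swap {α β : Type} (xs : List α) (ys : List β) (f : α → β → Int) :
    (xs.map (fun x => (ys.map (f x)).sum)).sum = (ys.map (fun y => (xs.map (fun x => f x y)).sum)).sum := by
  induction xs with
  | nil => simp [List.sum_eq_zero]
  | cons x xs ih => simp [ih]

theorem pv_sum_enumerate_pick (g : Int → Int) (target : Int) :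
    ∀ (row : List Int) (s : Int),
    ((PySem.List.enumerate row s).map (fun tv => if tv.1 = target then g tv.2 else 0)).sum
      = if s ≤ target ∧ target < s + row.length then g (row.getD (target - s).toNat 0) else 0 := by
  intro row
  induction row with
  | nil => intro s; simp [PySem.List.enumerate_nil]
  | cons v row ih =>
    intro s
    rw [PySem.List.enumerate_cons]
    simp only [List.map_cons, List.sum_cons, ih (s + 1), List.length_cons]
    push_cast
    by_cases h : s = target
    · subst h
      have h2 : ¬ (s + 1 ≤ s) := by omega
      simp [h2, show s ≤ s ∧ s < s + ((row.length : Int) + 1) by constructor <;> omega]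
    · have h3 : ((s + 1 ≤ target ∧ target < s + 1 + (row.length : Int)) ↔
          (s ≤ target ∧ target < s + ((row.length : Int) + 1))) := by omega
      rw [if_neg h]
      by_cases h4 : s ≤ target ∧ target < s + ((row.length : Int) + 1)
      · rw [if_pos (h3.mpr h4), if_pos h4]
        have h5 : (target - s).toNat = (target - (s + 1)).toNat + 1 := by omega
        simp [h5]
      · rw [if_neg (fun hc => h4 (h3.mp hc)), if_neg h4]
        simp

-- ===== weight functions =====
def pvW2 (m Tv v1 T1 : Int) (t2v : Int × Int) : Int :=
  if T1 + t2v.1 = Tv ∧ T1 + t2v.1 ≤ m then v1 * t2v.2 else 0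

def pvW1 (m Tv : Int) (terms : List (Int × Int)) (tv : Int × Int) : Int :=
  (terms.map (pvW2 m Tv tv.2 tv.1)).sum

def pvInner (A : List (List Int)) (B_terms : List (List (Int × Int))) (m Tv L1 L2 : Int) : Int :=
  ((PySem.List.enumerate ((PySem.List.pyGet? A L1).getD []) 0).map
    (pvW1 m Tv ((PySem.List.pyGet? B_terms L2).getD []))).sum

def pvWL2 (A : List (List Int)) (B_terms : List (List (Int × Int))) (m Tv Lv L1 L2 : Int) : Int :=
  if L1 + L2 = Lv then pvInner A B_terms m Tv L1 L2 else 0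

def pvWL1 (A : List (List Int)) (B_terms : List (List (Int × Int))) (m Tv Lv n L1 : Int) : Int :=
  ((PySem.List.pyRange 1 (n - L1 + 1) 1).map (pvWL2 A B_terms m Tv Lv L1)).sum

theorem pv_W1_zero (m Tv : Int) (terms : List (Int × Int)) (tv : Int × Int) (h : tv.2 = 0) :
    pvW1 m Tv terms tv = 0 := by
  apply List.sum_eq_zero
  intro x hx
  obtain ⟨t2v, _, rfl⟩ := List.mem_map.mp hx
  simp [pvW2, h]

theorem pv_inner_zero_row (A : List (List Int)) (B_terms : List (List (Int × Int))) (m Tv L1 L2 : Int)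
    (h : ∀ v ∈ (PySem.List.pyGet? A L1).getD [], v = 0) :
    pvInner A B_terms m Tv L1 L2 = 0 := by
  apply List.sum_eq_zero
  intro x hx
  obtain ⟨tv, htv, rfl⟩ := List.mem_map.mp hx
  obtain ⟨k, hk, rfl⟩ := (PySem.List.mem_enumerate_iff _ _ _).mp htv
  exact pv_W1_zero _ _ _ _ (h _ (List.getElem_mem hk))

theorem pv_inner_nil (A : List (List Int)) (B_terms : List (List (Int × Int))) (m Tv L1 L2 : Int)
    (h : (PySem.List.pyGet? B_terms L2).getD [] = []) :
    pvInner A B_terms m Tv L1 L2 = 0 := by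
  apply List.sum_eq_zero
  intro x hx
  obtain ⟨tv, htv, rfl⟩ := List.mem_map.mp hx
  simp [pvW1, h]

theorem pv_getD_set_self' {α : Type} (l : List α) (j : Nat) (h : j < l.length) (v d : α) :
    (l.set j v).getD j d = v := by simp [List.getD, h]

theorem pv_getD_set_ne' {α : Type} (l : List α) (j k : Nat) (h : j ≠ k) (v d : α) :
    (l.set j v).getD k d = l.getD k d := by simp [List.getD, List.getElem?_set_ne h]

theorem pv_termsfold (m : Int) (Tstar : Nat) (T1 v1 : Int) (terms : List (Int × Int))
    (hterms : ∀ p ∈ terms, 0 ≤ p.1) (hT1 : 0 ≤ T1) :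
    ∀ (s : Int) (out : List Int), out.length = (m + 1).toNat → out.getD Tstar 0 = s % pvMOD →
      (terms.foldl (fun out t2v =>
          if T1 + t2v.1 ≤ m then
            PySem.List.pySetD out (T1 + t2v.1)
              (PySem.Int.mod (PySem.List.pyGetD out (T1 + t2v.1) 0 + v1 * t2v.2) pvMOD)
          else out) out).length = (m + 1).toNat
      ∧ (terms.foldl (fun out t2v =>
          if T1 + t2v.1 ≤ m then
            PySem.List.pySetD out (T1 + t2v.1)
              (PySem.Int.mod (PySem.List.pyGetD out (T1 + t2v.1) 0 + v1 * t2v.2) pvMOD)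
          else out) out).getD Tstar 0
          = (s + (terms.map (pvW2 m Tstar v1 T1)).sum) % pvMOD := by
  intro s out hlen hval
  refine pv_foldl_mod_inv (β := List Int) pvMOD (fun r => r.getD Tstar 0)
    (fun r => r.length = (m + 1).toNat)
    (fun out t2v =>
      if T1 + t2v.1 ≤ m then
        PySem.List.pySetD out (T1 + t2v.1)
          (PySem.Int.mod (PySem.List.pyGetD out (T1 + t2v.1) 0 + v1 * t2v.2) pvMOD)
      else out)
    (pvW2 m Tstar v1 T1) terms ?_ s out hlen hval
  intro g t2v s' hmem hQ hp
  simp only at hQ hp ⊢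
  have h0 : 0 ≤ T1 + t2v.1 := add_nonneg hT1 (hterms _ hmem)
  by_cases hle : T1 + t2v.1 ≤ m
  · have hltg : (T1 + t2v.1).toNat < g.length := by omega
    rw [if_pos hle, PySem.List.pySetD_of_nonneg g _ h0]
    have hget : PySem.List.pyGetD g (T1 + t2v.1) 0 = g[(T1 + t2v.1).toNat] :=
      PySem.List.pyGetD_eq_getElem g 0 h0 (by omega)
    have hmodM : (0 : Int) < pvMOD := by norm_num [pvMOD]
    by_cases heq : (T1 + t2v.1).toNat = Tstar
    · subst heq
      refine ⟨by simp [hQ], ?_⟩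
      rw [pv_getD_set_self _ _ hltg, hget]
      have hg : g[(T1 + t2v.1).toNat] = s' % pvMOD := by
        rw [← hp]; exact (List.getD_eq_getElem g 0 hltg).symm
      rw [hg, PySem.Int.mod_eq_emod_of_pos hmodM, Int.emod_add_emod]
      rw [pvW2, if_pos ⟨by omega, hle⟩]
    · refine ⟨by simp [hQ], ?_⟩
      rw [pv_getD_set_ne _ _ _ heq, hp, pvW2, if_neg (by omega)]
      simp
  · rw [if_neg hle]
    refine ⟨hQ, ?_⟩
    rw [hp, pvW2, if_neg (by omega)]
    simp

theorem pv_rowfold (m : Int) (Tstar : Nat) (row1 : List Int) (terms : List (Int × Int))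
    (hterms : ∀ p ∈ terms, 0 ≤ p.1) :
    ∀ (s : Int) (out : List Int), out.length = (m + 1).toNat → out.getD Tstar 0 = s % pvMOD →
      ((PySem.List.enumerate row1 0).foldl (fun out tv =>
          if tv.2 ≠ 0 then
            terms.foldl (fun out t2v =>
              if tv.1 + t2v.1 ≤ m then
                PySem.List.pySetD out (tv.1 + t2v.1)
                  (PySem.Int.mod (PySem.List.pyGetD out (tv.1 + t2v.1) 0 + tv.2 * t2v.2) pvMOD)
              else out) out
          else out) out).length = (m + 1).toNat
      ∧ ((PySem.List.enumerate row1 0).foldl (fun out tv =>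
          if tv.2 ≠ 0 then
            terms.foldl (fun out t2v =>
              if tv.1 + t2v.1 ≤ m then
                PySem.List.pySetD out (tv.1 + t2v.1)
                  (PySem.Int.mod (PySem.List.pyGetD out (tv.1 + t2v.1) 0 + tv.2 * t2v.2) pvMOD)
              else out) out
          else out) out).getD Tstar 0
          = (s + ((PySem.List.enumerate row1 0).map (pvW1 m Tstar terms)).sum) % pvMOD := by
  intro s out hlen hval
  refine pv_foldl_mod_inv (β := List Int) pvMOD (fun r => r.getD Tstar 0)
    (fun r => r.length = (m + 1).toNat)
    (fun out tv =>
      if tv.2 ≠ 0 then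
        terms.foldl (fun out t2v =>
          if tv.1 + t2v.1 ≤ m then
            PySem.List.pySetD out (tv.1 + t2v.1)
              (PySem.Int.mod (PySem.List.pyGetD out (tv.1 + t2v.1) 0 + tv.2 * t2v.2) pvMOD)
          else out) out
      else out)
    (pvW1 m Tstar terms) (PySem.List.enumerate row1 0) ?_ s out hlen hval
  intro g tv s' hmem hQ hp
  simp only at hQ hp ⊢
  have hT1 : 0 ≤ tv.1 := by
    obtain ⟨k, hk, rfl⟩ := (PySem.List.mem_enumerate_iff _ _ _).mp hmem
    simp
  by_cases hv : tv.2 ≠ 0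
  · rw [if_pos hv]
    exact pv_termsfold m Tstar tv.1 tv.2 terms hterms hT1 s' g hQ hp
  · rw [if_neg hv]
    refine ⟨hQ, ?_⟩
    rw [hp, pv_W1_zero m Tstar terms tv (by simpa using hv)]
    simp

theorem pv_rowfold_len (m : Int) (row1 : List Int) (terms : List (Int × Int)) (out : List Int) :
    ((PySem.List.enumerate row1 0).foldl (fun out tv =>
        if tv.2 ≠ 0 then
          terms.foldl (fun out t2v =>
            if tv.1 + t2v.1 ≤ m then
              PySem.List.pySetD out (tv.1 + t2v.1)
                (PySem.Int.mod (PySem.List.pyGetD out (tv.1 + t2v.1) 0 + tv.2 * t2v.2) pvMOD)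
            else out) out
        else out) out).length = out.length := by
  apply pv_foldl_len
  intro r tv
  by_cases hv : tv.2 ≠ 0
  · rw [if_pos hv]
    apply pv_foldl_len
    intro r' t2v
    by_cases hle : tv.1 + t2v.1 ≤ m
    · rw [if_pos hle]; exact PySem.List.length_pySetD _ _ _
    · rw [if_neg hle]
  · rw [if_neg hv]

theorem pvA_cell (A : List (List Int)) (B_terms : List (List (Int × Int))) (n m : Int)
    (Lstar Tstar : Nat)
    (hT2 : ∀ L2 ∈ PySem.List.pyRange 1 (n + 1) 1,
      (¬ ∀ r ∈ A.take ((n - L2 + 1).toNat), ∀ v ∈ r, v = 0) →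
      ∀ p ∈ (PySem.List.pyGet? B_terms L2).getD [], 0 ≤ p.1) :
    (convolve_len_tiles_py A B_terms n m).length = (n + 1).toNat
    ∧ (∀ r ∈ convolve_len_tiles_py A B_terms n m, r.length = (m + 1).toNat)
    ∧ ((convolve_len_tiles_py A B_terms n m).getD Lstar []).getD Tstar 0
        = (((PySem.List.pyRange 0 (n + 1) 1).map (pvWL1 A B_terms m Tstar Lstar n)).sum) % pvMOD := by
  have hmain := pv_foldl_mod_inv (β := List (List Int)) pvMOD
    (fun g => (g.getD Lstar []).getD Tstar 0)
    (fun g => g.length = (n + 1).toNat ∧ ∀ r ∈ g, r.length = (m + 1).toNat)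
    (fun C L1 =>
      if ((PySem.List.pyGet? A L1).getD []).any (fun v => v ≠ 0) then
        (PySem.List.pyRange 1 (n - L1 + 1) 1).foldl (fun C L2 =>
          if ((PySem.List.pyGet? B_terms L2).getD []) ≠ [] then
            PySem.List.pySetD C (L1 + L2)
              ((PySem.List.enumerate ((PySem.List.pyGet? A L1).getD []) 0).foldl (fun out tv =>
                if tv.2 ≠ 0 then
                  ((PySem.List.pyGet? B_terms L2).getD []).foldl (fun out t2v =>
                    if tv.1 + t2v.1 ≤ m then
                      PySem.List.pySetD out (tv.1 + t2v.1)
                        (PySem.Int.mod (PySem.List.pyGetD out (tv.1 + t2v.1) 0 + tv.2 * t2v.2) pvMOD)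
                    else out) out
                else out) (PySem.List.pyGetD C (L1 + L2) []))
          else C) C
      else C)
    (pvWL1 A B_terms m Tstar Lstar n) (PySem.List.pyRange 0 (n + 1) 1)
    ?compat 0
    ((PySem.List.pyRange 0 (n + 1) 1).map
      (fun _ => (PySem.List.pyRange 0 (m + 1) 1).map (fun _ => (0 : Int))))
    ?q0 ?p0
  case compat =>
    intro g L1 s hmem hQ hp
    simp only at hQ hp ⊢
    have hL1 : 0 ≤ L1 ∧ L1 < n + 1 := by
      have := PySem.List.mem_pyRange_one.mp hmem
      omega
    by_cases hany : ((PySem.List.pyGet? A L1).getD []).any (fun v => v ≠ 0)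
    · rw [if_pos hany]
      refine pv_foldl_mod_inv (β := List (List Int)) pvMOD
        (fun g => (g.getD Lstar []).getD Tstar 0)
        (fun g => g.length = (n + 1).toNat ∧ ∀ r ∈ g, r.length = (m + 1).toNat)
        _ (pvWL2 A B_terms m Tstar Lstar L1) (PySem.List.pyRange 1 (n - L1 + 1) 1)
        ?_ s g hQ hp
      intro g' L2 s' hmem' hQ' hp'
      simp only at hQ' hp' ⊢
      have hL2 : 1 ≤ L2 ∧ L2 ≤ n - L1 := by
        have := PySem.List.mem_pyRange_one.mp hmem'
        omega
      have hterms : ∀ p ∈ (PySem.List.pyGet? B_terms L2).getD [], 0 ≤ p.1 := by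
        apply hT2 L2 (PySem.List.mem_pyRange_one.mpr ⟨by omega, by omega⟩)
        intro hall
        rcases hA : PySem.List.pyGet? A L1 with _ | row
        · rw [hA] at hany; simp at hany
        · rw [hA] at hany
          simp only [Option.getD_some] at hany
          obtain ⟨v, hv, hvne⟩ := List.any_eq_true.mp hany
          have hsome : A[L1.toNat]? = some row := by
            rw [← PySem.List.pyGet?_of_nonneg A hL1.1, hA]
          obtain ⟨hlt, hrow⟩ := List.getElem?_eq_some_iff.mp hsome
          have hltk : L1.toNat < (n - L2 + 1).toNat := by omega
          have hrowmem : row ∈ A.take ((n - L2 + 1).toNat) := by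
            rw [← hrow]
            have hlen' : L1.toNat < (A.take ((n - L2 + 1).toNat)).length := by
              simp [List.length_take]; omega
            have := List.getElem_take (xs := A) (i := L1.toNat)
              (h := hlen')
            rw [← this]
            exact List.getElem_mem hlen'
          exact absurd (hall row hrowmem v hv) (by simpa using hvne)
      by_cases hts : ((PySem.List.pyGet? B_terms L2).getD []) ≠ []
      · rw [if_pos hts]
        have hidx0 : 0 ≤ L1 + L2 := by omega
        have hidxlt : (L1 + L2).toNat < g'.length := by omega
        have hout : PySem.List.pyGetD g' (L1 + L2) [] = g'[(L1 + L2).toNat] :=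
          PySem.List.pyGetD_eq_getElem g' [] hidx0 (by omega)
        have houtlen : g'[(L1 + L2).toNat].length = (m + 1).toNat :=
          hQ'.2 _ (List.getElem_mem hidxlt)
        rw [PySem.List.pySetD_of_nonneg g' _ hidx0, hout]
        by_cases hhit : (L1 + L2).toNat = Lstar
        · subst hhit
          have hgD : g'.getD (L1 + L2).toNat [] = g'[(L1 + L2).toNat] :=
            List.getD_eq_getElem g' [] hidxlt
          rw [hgD] at hp'
          obtain ⟨hlen2, hval2⟩ := pv_rowfold m Tstar ((PySem.List.pyGet? A L1).getD [])
            ((PySem.List.pyGet? B_terms L2).getD []) hterms s' g'[(L1 + L2).toNat] houtlen hp'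
          refine ⟨⟨by simp [hQ'.1], ?_⟩, ?_⟩
          · intro r hr
            rcases List.mem_or_eq_of_mem_set hr with h | h
            · exact hQ'.2 _ h
            · rw [h]; exact hlen2
          · rw [pv_getD_set_self' _ _ (by omega) _ [], hval2, pvWL2, if_pos (by omega)]
            rfl
        · refine ⟨⟨by simp [hQ'.1], ?_⟩, ?_⟩
          · intro r hr
            rcases List.mem_or_eq_of_mem_set hr with h | h
            · exact hQ'.2 _ h
            · rw [h, pv_rowfold_len]; exact houtlen
          · rw [pv_getD_set_ne' _ _ _ hhit _ [], hp', pvWL2, if_neg (by omega)]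
            simp
      · rw [if_neg hts]
        refine ⟨hQ', ?_⟩
        rw [hp', pvWL2]
        have : pvInner A B_terms m Tstar L1 L2 = 0 :=
          pv_inner_nil A B_terms m Tstar L1 L2 (by simpa using hts)
        simp [this]
    · rw [if_neg hany]
      refine ⟨hQ, ?_⟩
      rw [hp]
      have hz : ∀ v ∈ (PySem.List.pyGet? A L1).getD [], v = 0 := by
        simp only [List.any_eq_true, ne_eq, decide_not] at hany
        intro v hv
        by_contra hne
        exact hany ⟨v, hv, by simp [hne]⟩
      have : pvWL1 A B_terms m Tstar Lstar n L1 = 0 := by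
        apply List.sum_eq_zero
        intro x hx
        obtain ⟨L2, _, rfl⟩ := List.mem_map.mp hx
        simp [pvWL2, pv_inner_zero_row A B_terms m Tstar L1 L2 hz]
      simp [this]
  case q0 =>
    constructor
    · simp [PySem.List.length_pyRange_one]
    · intro r hr
      obtain ⟨_, _, rfl⟩ := List.mem_map.mp hr
      simp [PySem.List.length_pyRange_one]
  case p0 =>
    simp only
    have hz : ∀ x ∈ (((PySem.List.pyRange 0 (n + 1) 1).map
        (fun _ => (PySem.List.pyRange 0 (m + 1) 1).map (fun _ => (0 : Int)))).getD Lstar []), x = 0 := by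
      intro x hx
      rcases hL : ((PySem.List.pyRange 0 (n + 1) 1).map
        (fun _ => (PySem.List.pyRange 0 (m + 1) 1).map (fun _ => (0 : Int))))[Lstar]? with _ | r
      · simp only [List.getD, hL, Option.getD_none] at hx
        exact absurd hx (by simp)
      · simp only [List.getD, hL, Option.getD_some] at hx
        obtain ⟨_, _, rfl⟩ := List.mem_map.mp (List.mem_of_getElem? hL)
        obtain ⟨_, _, h0⟩ := List.mem_map.mp hx
        exact h0.symm
    rw [pv_getD_zero _ hz]
    simp
  -- conclude
  obtain ⟨⟨hlen, hrows⟩, hval⟩ := hmain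
  simp only [convolve_len_tiles_py]
  exact ⟨hlen, hrows, by rw [hval]; simp⟩

theorem pv_pyGet?_none_of_ge {α : Type} (xs : List α) (i : Int) (h : (xs.length : Int) ≤ i) :
    PySem.List.pyGet? xs i = none := by
  rw [PySem.List.pyGet?_eq_none_iff]
  simp [PySem.Raise.InRange]
  omega

def pvWB (A : List (List Int)) (B_terms : List (List (Int × Int))) (Tv L L2 : Int) : Int :=
  (((PySem.List.pyGet? B_terms L2).getD []).map (fun t2v =>
    if 0 ≤ Tv - t2v.1 ∧ Tv - t2v.1 < PySem.List.len ((PySem.List.pyGet? A (L - L2)).getD []) then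
      PySem.List.pyGetD ((PySem.List.pyGet? A (L - L2)).getD []) (Tv - t2v.1) 0 * t2v.2
    else 0)).sum

-- the gather fold of port B, as a sum
theorem pvB_fold_sum (A : List (List Int)) (B_terms : List (List (Int × Int))) (L T : Int) :
    ((PySem.List.pyRange 1 (min L (PySem.List.len B_terms - 1) + 1) 1).foldl (fun s L2 =>
        ((PySem.List.pyGet? B_terms L2).getD []).foldl (fun s t2v =>
          if 0 ≤ T - t2v.1 ∧ T - t2v.1 < PySem.List.len ((PySem.List.pyGet? A (L - L2)).getD []) then
            s + PySem.List.pyGetD ((PySem.List.pyGet? A (L - L2)).getD []) (T - t2v.1) 0 * t2v.2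
          else s) s) 0)
      = ((PySem.List.pyRange 1 (min L (PySem.List.len B_terms - 1) + 1) 1).map
          (pvWB A B_terms T L)).sum := by
  have hstep : ∀ (s : Int) (L2 : Int),
      ((PySem.List.pyGet? B_terms L2).getD []).foldl (fun s t2v =>
          if 0 ≤ T - t2v.1 ∧ T - t2v.1 < PySem.List.len ((PySem.List.pyGet? A (L - L2)).getD []) then
            s + PySem.List.pyGetD ((PySem.List.pyGet? A (L - L2)).getD []) (T - t2v.1) 0 * t2v.2
          else s) s = s + pvWB A B_terms T L L2 := by
    intro s L2
    exact pv_foldl_ite_add _ _ _ s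
  simp only [hstep]
  rw [PySem.List.foldl_add]
  simp

-- per-(L1,L2) bridge: scatter inner double sum = gather inner sum
theorem pv_inner_eq (A : List (List Int)) (B_terms : List (List (Int × Int))) (m Tv : Int)
    (hTvm : Tv ≤ m) (L L2 : Int) :
    pvInner A B_terms m Tv (L - L2) L2 = pvWB A B_terms Tv L L2 := by
  unfold pvInner pvWB pvW1
  rw [pv_sum_swap]
  apply congrArg
  apply List.map_congr_left
  intro t2v _
  set row := (PySem.List.pyGet? A (L - L2)).getD [] with hrowdef
  have h1 : ∀ tv : Int × Int, pvW2 m Tv tv.2 tv.1 t2v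
      = if tv.1 = Tv - t2v.1 then tv.2 * t2v.2 else 0 := by
    intro tv
    rw [pvW2]
    by_cases hc : tv.1 + t2v.1 = Tv
    · rw [if_pos ⟨hc, by omega⟩, if_pos (by omega)]
    · rw [if_neg (by omega), if_neg (by omega)]
  calc ((PySem.List.enumerate row 0).map (fun tv => pvW2 m Tv tv.2 tv.1 t2v)).sum
      = ((PySem.List.enumerate row 0).map
          (fun tv => if tv.1 = Tv - t2v.1 then tv.2 * t2v.2 else 0)).sum := by
        apply congrArg; apply List.map_congr_left; intro tv _; exact h1 tv
    _ = if 0 ≤ Tv - t2v.1 ∧ Tv - t2v.1 < 0 + (row.length : Int) then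
          (row.getD (Tv - t2v.1 - 0).toNat 0) * t2v.2 else 0 := by
        exact pv_sum_enumerate_pick (fun v => v * t2v.2) (Tv - t2v.1) row 0
    _ = if 0 ≤ Tv - t2v.1 ∧ Tv - t2v.1 < PySem.List.len row then
          PySem.List.pyGetD row (Tv - t2v.1) 0 * t2v.2 else 0 := by
        by_cases hc : 0 ≤ Tv - t2v.1 ∧ Tv - t2v.1 < (row.length : Int)
        · rw [if_pos (by omega : 0 ≤ Tv - t2v.1 ∧ Tv - t2v.1 < 0 + (row.length : Int)),
            if_pos (by simp [PySem.List.len_eq]; omega)]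
          rw [PySem.List.pyGetD_eq_getElem row 0 hc.1 hc.2]
          rw [List.getD_eq_getElem row 0 (by omega)]
          simp
        · rw [if_neg (by omega), if_neg (by simp [PySem.List.len_eq]; omega)]

theorem pv_sum_chain (A : List (List Int)) (B_terms : List (List (Int × Int))) (n m : Int)
    (Lstar Tstar : Nat) (hLs : (Lstar : Int) ≤ n) (hTs : (Tstar : Int) ≤ m) :
    ((PySem.List.pyRange 0 (n + 1) 1).map (pvWL1 A B_terms m Tstar Lstar n)).sum
      = ((PySem.List.pyRange 1 (min (Lstar : Int) (PySem.List.len B_terms - 1) + 1) 1).map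
          (pvWB A B_terms (Tstar : Int) (Lstar : Int))).sum := by
  rw [pv_sum_pyRange, pv_sum_pyRange]
  -- Step A: collapse the inner indicator sum of each pvWL1
  have hA : ∀ k ∈ Finset.range ((n + 1) - 0).toNat,
      pvWL1 A B_terms m Tstar Lstar n (0 + (k : Int))
        = if (k : Int) < (Lstar : Int) then
            pvInner A B_terms m Tstar ((Lstar : Int) - ((Lstar : Int) - k)) ((Lstar : Int) - k)
          else 0 := by
    intro k hk
    have hkN : (k : Int) ≤ n := by
      simp only [Finset.mem_range] at hk; omega
    rw [pvWL1, pv_sum_pyRange]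
    by_cases hklt : (k : Int) < (Lstar : Int)
    · rw [if_pos hklt]
      rw [Finset.sum_eq_single_of_mem (Lstar - k - 1)]
      · rw [pvWL2, if_pos (by omega)]
        have e1 : (0 : Int) + (k : Int) = (Lstar : Int) - ((Lstar : Int) - (k : Int)) := by omega
        have e2 : (1 : Int) + ((Lstar - k - 1 : Nat) : Int) = (Lstar : Int) - (k : Int) := by
          omega
        rw [e1, e2]
      · simp only [Finset.mem_range]; omega
      · intro j _ hj
        rw [pvWL2, if_neg (by omega)]
    · rw [if_neg hklt]
      apply Finset.sum_eq_zero
      intro j _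
      rw [pvWL2, if_neg (by omega)]
  rw [Finset.sum_congr rfl hA]
  -- Step B: restrict to range Lstar
  have hsub : Finset.range Lstar ⊆ Finset.range ((n + 1) - 0).toNat := by
    intro x hx
    simp only [Finset.mem_range] at hx ⊢
    omega
  rw [← Finset.sum_subset hsub (by
    intro x _ hx
    simp only [Finset.mem_range] at hx
    rw [if_neg (by omega)])]
  have hB : ∀ k ∈ Finset.range Lstar,
      (if (k : Int) < (Lstar : Int) then
          pvInner A B_terms m Tstar ((Lstar : Int) - ((Lstar : Int) - k)) ((Lstar : Int) - k)
        else 0)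
        = (fun k => pvInner A B_terms m Tstar ((Lstar : Int) - ((Lstar : Int) - k)) ((Lstar : Int) - k)) k := by
    intro k hk
    simp only [Finset.mem_range] at hk
    rw [if_pos (by omega)]
  rw [Finset.sum_congr rfl hB]
  -- Step C: reflect the summation order
  rw [← Finset.sum_range_reflect]
  -- Step D+E: rewrite each reflected term to pvWB, then truncate
  have hC : ∀ j ∈ Finset.range Lstar,
      (fun k : Int => pvInner A B_terms m Tstar ((Lstar : Int) - ((Lstar : Int) - k)) ((Lstar : Int) - k))
          (((Lstar - 1 - j : Nat) : Int))
        = pvInner A B_terms m Tstar ((Lstar : Int) - (1 + (j : Int))) (1 + (j : Int)) := by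
    intro j hj
    simp only [Finset.mem_range] at hj
    simp only
    have e1 : ((Lstar - 1 - j : Nat) : Int) = (Lstar : Int) - 1 - (j : Int) := by omega
    rw [e1]
    have e2 : (Lstar : Int) - ((Lstar : Int) - 1 - (j : Int)) = 1 + (j : Int) := by omega
    rw [e2]
  rw [Finset.sum_congr rfl hC]
  -- truncate zero tail and identify with pvWB
  have hK : ((min (Lstar : Int) (PySem.List.len B_terms - 1) + 1) - 1).toNat
      = (min (Lstar : Int) ((B_terms.length : Int) - 1)).toNat := by
    simp [PySem.List.len_eq]
  rw [hK]
  have hsub2 : Finset.range (min (Lstar : Int) ((B_terms.length : Int) - 1)).toNat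
      ⊆ Finset.range Lstar := by
    intro x hx
    simp only [Finset.mem_range] at hx ⊢
    omega
  rw [← Finset.sum_subset hsub2 (by
    intro x hx hx2
    simp only [Finset.mem_range] at hx hx2
    apply pv_inner_nil
    rw [pv_pyGet?_none_of_ge B_terms (1 + (x : Int)) (by omega)]
    rfl)]
  apply Finset.sum_congr rfl
  intro j hj
  rw [pv_inner_eq A B_terms m (Tstar : Int) hTs]

theorem pv_main (A : List (List Int)) (B_terms : List (List (Int × Int))) (n m : Int)
    (hT2 : ∀ L2 ∈ PySem.List.pyRange 1 (n + 1) 1,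
      (¬ ∀ r ∈ A.take ((n - L2 + 1).toNat), ∀ v ∈ r, v = 0) →
      ∀ p ∈ (PySem.List.pyGet? B_terms L2).getD [], 0 ≤ p.1) :
    convolve_len_tiles_py A B_terms n m = convolve_len_tiles_py_alt A B_terms n m := by
  obtain ⟨hlenA, hrowsA, _⟩ := pvA_cell A B_terms n m 0 0 hT2
  have hlenB : (convolve_len_tiles_py_alt A B_terms n m).length = (n + 1).toNat := by
    simp [convolve_len_tiles_py_alt, PySem.List.length_pyRange_one]
  have hrowB : ∀ (i : Nat) (hi : i < (convolve_len_tiles_py_alt A B_terms n m).length),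
      (convolve_len_tiles_py_alt A B_terms n m)[i]
        = (PySem.List.pyRange 0 (m + 1) 1).map (fun T =>
            PySem.Int.mod
              ((PySem.List.pyRange 1 (min ((i : Int)) (PySem.List.len B_terms - 1) + 1) 1).foldl (fun s L2 =>
                ((PySem.List.pyGet? B_terms L2).getD []).foldl (fun s t2v =>
                  if 0 ≤ T - t2v.1 ∧ T - t2v.1 < PySem.List.len ((PySem.List.pyGet? A ((i : Int) - L2)).getD []) then
                    s + PySem.List.pyGetD ((PySem.List.pyGet? A ((i : Int) - L2)).getD []) (T - t2v.1) 0 * t2v.2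
                  else s) s) 0)
              pvMOD) := by
    intro i hi
    simp only [convolve_len_tiles_py_alt] at hi ⊢
    rw [List.getElem_map, PySem.List.getElem_pyRange_one]
    simp [zero_add]
  apply List.ext_getElem (by rw [hlenA, hlenB])
  intro i h1 h2
  have hrowAlen : (convolve_len_tiles_py A B_terms n m)[i].length = (m + 1).toNat :=
    hrowsA _ (List.getElem_mem h1)
  rw [hrowB i h2]
  apply List.ext_getElem (by simp [hrowAlen, PySem.List.length_pyRange_one])
  intro j hj1 hj2
  -- right-hand cell value
  rw [List.getElem_map, PySem.List.getElem_pyRange_one]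
  rw [pvB_fold_sum A B_terms (i : Int) (0 + (j : Int))]
  -- left-hand cell value via pvA_cell
  obtain ⟨_, _, hcell⟩ := pvA_cell A B_terms n m i j hT2
  have hgD1 : (convolve_len_tiles_py A B_terms n m).getD i [] = (convolve_len_tiles_py A B_terms n m)[i] :=
    List.getD_eq_getElem _ [] h1
  rw [hgD1, List.getD_eq_getElem _ 0 hj1] at hcell
  rw [hcell]
  -- both sides mod
  have hmodM : (0 : Int) < pvMOD := by norm_num [pvMOD]
  rw [PySem.Int.mod_eq_emod_of_pos hmodM]
  have hLs : (i : Int) ≤ n := by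
    have := h1; rw [hlenA] at this; omega
  have hTs : (j : Int) ≤ m := by
    have := hj1; rw [hrowAlen] at this; omega
  rw [pv_sum_chain A B_terms n m i j hLs hTs]
  norm_num


theorem pv_neg (A : List (List Int)) (B_terms : List (List (Int × Int))) (n m : Int)
    (hn : n < 0) :
    convolve_len_tiles_py A B_terms n m = convolve_len_tiles_py_alt A B_terms n m := by
  have h0 : PySem.List.pyRange 0 (n + 1) 1 = [] :=
    PySem.List.pyRange_one_eq_nil (by omega)
  simp only [convolve_len_tiles_py, convolve_len_tiles_py_alt, h0, List.map_nil, List.foldl_nil]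

-- ===== VERDICT (by name: the statement is the Claim_ definition above) =====
theorem convolve_len_tiles_py_spec : Claim_equal_convolve_len_tiles_py := by
  intro A B_terms max_len max_tiles _ hPre
  unfold Spec_convolve_len_tiles_py
  rcases hPre with hneg | ⟨_, _, hT2⟩
  · exact pv_neg A B_terms max_len max_tiles hneg
  · exact pv_main A B_terms max_len max_tiles hT2
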